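-- pv_equiv track=rewrite | github.com/hhqx/leetcode | exercise/0403_阿里淘宝机器学习/3.py | func
-- ===== SOURCE A (Python) =====
-- from heapq import heappop, heappush
-- from math import inf
--
-- def func(edge, n, k):
--     """ 复杂度 o(n*n+m) """
--     g = [[] for _ in range(n)]
--     for u, v in edge:
--         if u == v:
--             continue
--         g[u - 1].append(v - 1)
--         g[v - 1].append(u - 1)
--
--     def min_dis(start, n):
--         """ 堆优化的dijstra算法"""
--         h = [(0, start)]
--         mdis = [inf] * n
--         while h:
--             dis, u = heappop(h)
--             if dis < mdis[u]:
--                 mdis[u] = dis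
--             else:
--                 continue
--             for v in g[u]:
--                 heappush(h, (dis + 1, v))
--         return mdis
--
--     mdis0 = min_dis(0, n)
--     # 若最短距离小于k, 返回0
--     if mdis0[n - 1] < k:
--         return 0
--     mdis1 = min_dis(n - 1, n)
--     # print_std('dis0', mdis0)
--     # print_std('dis1', mdis1)
--     ans = 0
--     for i in range(n):
--         for j in range(i, n):
--             if i == j:
--                 # 自环
--                 if mdis0[i] + mdis1[j] == k:
--                     ans += 1
--             else:
--                 # 重边或新边
--                 if mdis0[i] + mdis1[j] + 1 == k:
--                     ans += 1
--
--     return ans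
-- ===== SOURCE B (Python) =====
-- from math import inf
--
-- def func(edge, n, k):
--     g = [[] for _ in range(n)]
--     for u, v in edge:
--         if u != v:
--             g[u - 1].append(v - 1)
--             g[v - 1].append(u - 1)
--
--     def min_dis(start):
--         # plain Dijkstra: queue is an unsorted list, pop its minimum by scanning
--         q = [(0, start)]
--         mdis = [inf] * n
--         while q:
--             pair = min(q)
--             q.remove(pair)
--             dis, u = pair
--             if dis < mdis[u]:
--                 mdis[u] = dis
--                 for v in g[u]:
--                     q.append((dis + 1, v))
--         return mdis
--
--     mdis0 = min_dis(0)
--     if mdis0[n - 1] < k: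
--         return 0
--     mdis1 = min_dis(n - 1)
--
--     # one pass with a frequency map instead of the O(n^2) double loop
--     ans = 0
--     cnt = {}
--     for j in range(n):
--         a, b = mdis0[j], mdis1[j]
--         if a + b == k:
--             ans += 1
--         if b != inf:
--             ans += cnt.get(k - 1 - b, 0)
--         if a != inf:
--             cnt[a] = cnt.get(a, 0) + 1
--     return ans
-- ===== Notes on version B (the rewrite author's own statement) =====
-- stated objective: alternative
-- what changed: B counts the k-sum pairs in one pass with a frequency map instead of A's O(n^2) double loop over all i<=j, and replaces A's heapq priority queue by a plain list from which the minimum is popped by scanning.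
import Mathlib
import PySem

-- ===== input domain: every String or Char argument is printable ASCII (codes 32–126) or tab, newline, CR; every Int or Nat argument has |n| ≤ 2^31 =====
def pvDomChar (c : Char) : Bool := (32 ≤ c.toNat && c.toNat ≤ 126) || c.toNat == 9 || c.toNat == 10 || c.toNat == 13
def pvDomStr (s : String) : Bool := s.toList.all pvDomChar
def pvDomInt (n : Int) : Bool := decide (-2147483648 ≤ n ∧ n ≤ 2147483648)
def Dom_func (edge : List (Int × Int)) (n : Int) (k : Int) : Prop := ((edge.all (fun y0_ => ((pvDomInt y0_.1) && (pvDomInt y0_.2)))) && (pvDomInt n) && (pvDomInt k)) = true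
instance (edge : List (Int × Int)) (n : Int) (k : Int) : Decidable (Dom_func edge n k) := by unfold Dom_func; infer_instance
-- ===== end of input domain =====

-- B replaces A's O(n^2) counting double loop by one pass with a frequency map and A's
-- heap queue by a plain pop-the-minimum list; both return values are proved equal.

-- Python's comparison of (int, int) tuples: lexicographic
def pqLe (x y : Int × Int) : Bool := x.1 < y.1 || (x.1 == y.1 && x.2 ≤ y.2)

-- g[i].append(v) on a list of lists, Python index semantics (negative i from the end);
-- shared by both ports because both Pythons build the adjacency lists with the same lines
def appendAt (g : List (List Int)) (i : Int) (v : Int) : List (List Int) :=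
  PySem.List.pySetD g i (PySem.List.pyGetD g i [] ++ [v])

def buildG (edge : List (Int × Int)) (n : Int) : List (List Int) :=
  edge.foldl
    (fun g p =>
      if p.1 == p.2 then g
      else appendAt (appendAt g (p.1 - 1) (p.2 - 1)) (p.2 - 1) (p.1 - 1))
    (List.replicate n.toNat [])

-- 'dis < mdis[u]' where mdis[u] may be inf (= none)
def ltInf (dis : Int) : Option Int → Bool
  | none => true
  | some d => dis < d

-- 'mdis0[n-1] < k' where the left side may be inf (= none)
def optLt (o : Option Int) (k : Int) : Bool :=
  match o with
  | none => false
  | some d => d < k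

-- ===== PORT A =====

-- heapq.heappush, ported (library call) as insertion into the heap kept as a sorted list:
-- observationally the same priority queue (heappop returns the minimum tuple)
def heapPush (h : List (Int × Int)) (x : Int × Int) : List (Int × Int) :=
  match h with
  | [] => [x]
  | y :: t => if pqLe x y then x :: y :: t else y :: heapPush t x

-- A's 'while h' Dijkstra loop; heappop = take the head of the sorted list.
-- fuel only makes the recursion structural; it is chosen ≥ the number of pops below.
def dijkA (g : List (List Int)) : Nat → List (Int × Int) → List (Option Int) → List (Option Int)
  | 0, _, mdis => mdis
  | _ + 1, [], mdis => mdis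
  | fuel + 1, (dis, u) :: rest, mdis =>
    if ltInf dis (PySem.List.pyGetD mdis u none) then
      dijkA g fuel
        ((PySem.List.pyGetD g u []).foldl (fun h v => heapPush h (dis + 1, v)) rest)
        (PySem.List.pySetD mdis u (some dis))
    else
      dijkA g fuel rest mdis

-- A's final double loop over i ≤ j
def countA (d0 d1 : List (Option Int)) (n k : Int) : Int :=
  (PySem.List.pyRange 0 n 1).foldl
    (fun ans i =>
      (PySem.List.pyRange i n 1).foldl
        (fun ans j =>
          if i == j then
            match PySem.List.pyGetD d0 i none, PySem.List.pyGetD d1 j none with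
            | some a, some b => if a + b == k then ans + 1 else ans
            | _, _ => ans
          else
            match PySem.List.pyGetD d0 i none, PySem.List.pyGetD d1 j none with
            | some a, some b => if a + b + 1 == k then ans + 1 else ans
            | _, _ => ans)
        ans)
    0

def func (edge : List (Int × Int)) (n : Int) (k : Int) : Int :=
  let g := buildG edge n
  -- pops ≤ 1 + pushes ≤ 1 + Σ deg = 1 + 2·|edge|, so this fuel never runs out
  let fuel := 2 * edge.length + 2
  let mdis0 := dijkA g fuel [(0, 0)] (List.replicate n.toNat none)
  if optLt (PySem.List.pyGetD mdis0 (n - 1) none) k then 0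
  else
    let mdis1 := dijkA g fuel [(0, n - 1)] (List.replicate n.toNat none)
    countA mdis0 mdis1 n k

-- ===== PORT B =====

-- min(q): Python's min over tuples (first minimal element; as a value, the minimum)
def minPair (q : List (Int × Int)) : Option (Int × Int) :=
  match q with
  | [] => none
  | x :: t => some (t.foldl (fun m y => if pqLe m y then m else y) x)

-- B's 'while q' loop: scan for the minimum, q.remove it, relax, append neighbours
def dijkB (g : List (List Int)) : Nat → List (Int × Int) → List (Option Int) → List (Option Int)
  | 0, _, mdis => mdis
  | fuel + 1, q, mdis =>
    match minPair q with
    | none => mdis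
    | some m =>
      let q' := (PySem.List.remove? q m).getD q
      if ltInf m.1 (PySem.List.pyGetD mdis m.2 none) then
        dijkB g fuel (q' ++ (PySem.List.pyGetD g m.2 []).map (fun v => (m.1 + 1, v)))
          (PySem.List.pySetD mdis m.2 (some m.1))
      else
        dijkB g fuel q' mdis

-- B's single counting pass with the frequency dict
def countB (d0 d1 : List (Option Int)) (n k : Int) : Int :=
  ((PySem.List.pyRange 0 n 1).foldl
    (fun (s : Int × PySem.Dict Int Int) j =>
      let a := PySem.List.pyGetD d0 j none
      let b := PySem.List.pyGetD d1 j none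
      let ans :=
        match a, b with
        | some av, some bv => if av + bv == k then s.1 + 1 else s.1
        | _, _ => s.1
      let ans :=
        match b with
        | some bv => ans + s.2.getD (k - 1 - bv) 0
        | none => ans
      let cnt :=
        match a with
        | some av => s.2.insert av (s.2.getD av 0 + 1)
        | none => s.2
      (ans, cnt))
    ((0 : Int), PySem.Dict.empty)).1

def func_alt (edge : List (Int × Int)) (n : Int) (k : Int) : Int :=
  let g := buildG edge n
  let fuel := 2 * edge.length + 2
  let mdis0 := dijkB g fuel [(0, 0)] (List.replicate n.toNat none)
  if optLt (PySem.List.pyGetD mdis0 (n - 1) none) k then 0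
  else
    let mdis1 := dijkB g fuel [(0, n - 1)] (List.replicate n.toNat none)
    countB mdis0 mdis1 n k

-- ===== PRECONDITION & SPEC =====
-- Exactly the inputs on which A returns: n ≥ 1 (min_dis indexes mdis[0] and mdis0[n-1]) and
-- every non-self-loop edge label inside Python's index range [1-n, n] (g[u-1] wraps for
-- labels ≤ 0 and raises IndexError outside that range; self-loops are skipped first).
def Pre_func (edge : List (Int × Int)) (n : Int) (k : Int) : Prop :=
  1 ≤ n ∧ ∀ p ∈ edge, p.1 = p.2 ∨ (1 - n ≤ p.1 ∧ p.1 ≤ n ∧ 1 - n ≤ p.2 ∧ p.2 ≤ n)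
instance (edge : List (Int × Int)) (n : Int) (k : Int) : Decidable (Pre_func edge n k) := by
  unfold Pre_func; infer_instance

def pvWitness_func : (List (Int × Int)) × Int × Int := ([(1, 2), (2, 3)], 3, 2)

def Spec_func (edge : List (Int × Int)) (n : Int) (k : Int) (out : Int) : Prop := out = func_alt edge n k
instance (edge : List (Int × Int)) (n : Int) (k : Int) (out : Int) : Decidable (Spec_func edge n k out) := by unfold Spec_func; infer_instance

-- ===== CLAIM (what is proved, stated in full; the proofs are below) =====
def Claim_equal_func : Prop := ∀ (edge : List (Int × Int)) (n : Int) (k : Int), Dom_func edge n k → Pre_func edge n k → Spec_func edge n k (func edge n k)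

-- ===== LEMMAS AND PROOFS =====

lemma pqLe_refl (x : Int × Int) : pqLe x x = true := by simp [pqLe]

lemma pqLe_total (x y : Int × Int) : pqLe x y = true ∨ pqLe y x = true := by
  simp [pqLe]; omega

lemma pqLe_antisymm {x y : Int × Int} (h1 : pqLe x y = true) (h2 : pqLe y x = true) : x = y := by
  simp [pqLe] at h1 h2
  have : x.1 = y.1 ∧ x.2 = y.2 := by omega
  exact Prod.ext this.1 this.2

lemma pqLe_trans {x y z : Int × Int} (h1 : pqLe x y = true) (h2 : pqLe y z = true) :
    pqLe x z = true := by
  simp [pqLe] at *; omega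

lemma perm_heapPush (h : List (Int × Int)) (x : Int × Int) : (heapPush h x).Perm (x :: h) := by
  induction h with
  | nil => simp [heapPush]
  | cons y t ih =>
    simp only [heapPush]
    split
    · exact List.Perm.refl _
    · exact (ih.cons y).trans (List.Perm.swap x y t)

lemma mem_heapPush {z x : Int × Int} {h : List (Int × Int)} :
    z ∈ heapPush h x ↔ z = x ∨ z ∈ h := by
  have := (perm_heapPush h x).mem_iff (a := z)
  simpa using this

lemma pairwise_heapPush {h : List (Int × Int)} (x : Int × Int)
    (hp : h.Pairwise (fun a b => pqLe a b = true)) :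
    (heapPush h x).Pairwise (fun a b => pqLe a b = true) := by
  induction h with
  | nil => simp [heapPush]
  | cons y t ih =>
    rcases List.pairwise_cons.mp hp with ⟨hy, ht⟩
    simp only [heapPush]
    split
    · rename_i hxy
      refine List.pairwise_cons.mpr ⟨?_, List.pairwise_cons.mpr ⟨hy, ht⟩⟩
      intro z hz
      rcases List.mem_cons.mp hz with rfl | hz
      · exact hxy
      · exact pqLe_trans hxy (hy z hz)
    · rename_i hxy
      have hyx : pqLe y x = true := by
        rcases pqLe_total x y with h' | h'
        · exact absurd h' hxy
        · exact h'
      refine List.pairwise_cons.mpr ⟨?_, ih ht⟩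
      intro z hz
      rcases mem_heapPush.mp hz with rfl | hz
      · exact hyx
      · exact hy z hz

lemma perm_foldl_heapPush (xs : List Int) (f : Int → Int × Int) :
    ∀ t : List (Int × Int),
      (xs.foldl (fun h v => heapPush h (f v)) t).Perm (t ++ xs.map f) := by
  induction xs with
  | nil => intro t; simp
  | cons x xs ih =>
    intro t
    simp only [List.foldl_cons, List.map_cons]
    refine (ih (heapPush t (f x))).trans ?_
    refine List.Perm.trans ?_ List.perm_middle.symm
    exact (perm_heapPush t (f x)).append_right _

lemma pairwise_foldl_heapPush (xs : List Int) (f : Int → Int × Int) :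
    ∀ t : List (Int × Int), t.Pairwise (fun a b => pqLe a b = true) →
      (xs.foldl (fun h v => heapPush h (f v)) t).Pairwise (fun a b => pqLe a b = true) := by
  induction xs with
  | nil => intro t ht; simpa using ht
  | cons x xs ih =>
    intro t ht
    exact ih _ (pairwise_heapPush (f x) ht)

lemma foldl_pick_mem (t : List (Int × Int)) :
    ∀ x, t.foldl (fun m y => if pqLe m y then m else y) x ∈ x :: t := by
  induction t with
  | nil => intro x; simp
  | cons y t ih =>
    intro x
    simp only [List.foldl_cons]
    rcases List.mem_cons.mp (ih (if pqLe x y then x else y)) with h | h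
    · rw [h]; split <;> simp
    · simp [h]

lemma foldl_pick_le (t : List (Int × Int)) :
    ∀ x z, z ∈ x :: t → pqLe (t.foldl (fun m y => if pqLe m y then m else y) x) z = true := by
  induction t with
  | nil =>
    intro x z hz
    simp at hz
    rw [hz]
    simpa using pqLe_refl x
  | cons y t ih =>
    intro x z hz
    simp only [List.foldl_cons]
    have hmin : pqLe (if pqLe x y then x else y) x = true ∧
        pqLe (if pqLe x y then x else y) y = true := by
      split
      · rename_i h; exact ⟨pqLe_refl x, h⟩
      · rename_i h
        rcases pqLe_total x y with h' | h'
        · exact absurd h' h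
        · exact ⟨h', pqLe_refl y⟩
    rcases List.mem_cons.mp hz with rfl | hz
    · exact pqLe_trans (ih _ _ (List.mem_cons_self)) hmin.1
    · rcases List.mem_cons.mp hz with rfl | hz
      · exact pqLe_trans (ih _ _ (List.mem_cons_self)) hmin.2
      · exact ih _ _ (List.mem_cons.mpr (Or.inr hz))

-- one Dijkstra step agrees: A pops the head of its sorted heap, B pops min(q);
-- they are the same value whenever A's heap is a sorted permutation of B's queue
lemma dijk_eq (g : List (List Int)) :
    ∀ (fuel : Nat) (h q : List (Int × Int)) (mdis : List (Option Int)),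
      h.Pairwise (fun a b => pqLe a b = true) → h.Perm q →
      dijkA g fuel h mdis = dijkB g fuel q mdis := by
  intro fuel
  induction fuel with
  | zero => intro h q mdis _ _; rfl
  | succ fuel ih =>
    intro h q mdis hp hperm
    cases h with
    | nil =>
      have : q = [] := hperm.nil_eq.symm
      subst this
      rfl
    | cons x t =>
      have hq : q ≠ [] := by
        intro hq; subst hq
        exact absurd hperm.symm.nil_eq (by simp)
      obtain ⟨y, s, rfl⟩ := List.exists_cons_of_ne_nil hq
      -- the popped values agree
      have hm := foldl_pick_mem s y
      set m := s.foldl (fun m y => if pqLe m y then m else y) y with hmdef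
      have hmx : m = x := by
        have hmq : m ∈ y :: s := hm
        have hmh : m ∈ x :: t := hperm.mem_iff.mpr hmq
        have hxm : pqLe x m = true := by
          rcases List.mem_cons.mp hmh with rfl | hmt
          · exact pqLe_refl m
          · exact (List.pairwise_cons.mp hp).1 m hmt
        have hmxle : pqLe m x = true :=
          foldl_pick_le s y x (hperm.mem_iff.mp List.mem_cons_self)
        exact pqLe_antisymm hmxle hxm
      have hfold : minPair (y :: s) = some x := by
        simp only [minPair, ← hmdef, hmx]
      have hremove : PySem.List.remove? (y :: s) x = some ((y :: s).erase x) := by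
        rw [← hmx]
        exact PySem.List.remove?_eq_some_erase (y :: s) m hm
      have herase : t.Perm ((y :: s).erase x) := by
        have := hperm.erase x
        simpa [List.erase_cons_head] using this
      simp only [dijkB, hfold, hremove, Option.getD_some]
      simp only [dijkA]
      split
      · exact ih _ _ _
          (pairwise_foldl_heapPush _ _ t (List.pairwise_cons.mp hp).2)
          (((perm_foldl_heapPush _ _ t).trans (herase.append_right _)))
      · exact ih _ _ _ (List.pairwise_cons.mp hp).2 herase

lemma dijk_eq' (g : List (List Int)) (fuel : Nat) (start : Int) (mdis : List (Option Int)) :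
    dijkA g fuel [(0, start)] mdis = dijkB g fuel [(0, start)] mdis :=
  dijk_eq g fuel _ _ mdis (by simp) (List.Perm.refl _)

-- ---- counting: A's triangle double loop = B's one pass with the frequency dict ----

-- the 0/1 contribution of the pair (i, j), i ≤ j, in A's double loop
def offC (d0 d1 : List (Option Int)) (k i j : Int) : Int :=
  match PySem.List.pyGetD d0 i none, PySem.List.pyGetD d1 j none with
  | some a, some b => if a + b + 1 = k then 1 else 0
  | _, _ => 0

def dgC (d0 d1 : List (Option Int)) (k j : Int) : Int :=
  match PySem.List.pyGetD d0 j none, PySem.List.pyGetD d1 j none with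
  | some a, some b => if a + b = k then 1 else 0
  | _, _ => 0

def cC (d0 d1 : List (Option Int)) (k i j : Int) : Int :=
  if i = j then dgC d0 d1 k j else offC d0 d1 k i j

lemma foldl_add_of {α : Type} (l : List α) (f : Int → α → Int) (c : α → Int)
    (h : ∀ ans x, f ans x = ans + c x) : ∀ init, l.foldl f init = init + (l.map c).sum := by
  induction l with
  | nil => intro init; simp
  | cons x t ih =>
    intro init
    simp only [List.foldl_cons, List.map_cons, List.sum_cons, h]
    rw [ih, add_assoc]

lemma sum_map_add {α : Type} (l : List α) (f g : α → Int) :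
    (l.map (fun x => f x + g x)).sum = (l.map f).sum + (l.map g).sum := by
  induction l with
  | nil => simp
  | cons x t ih => simp [ih]; ring

lemma stepA_eq (d0 d1 : List (Option Int)) (k i ans j : Int) :
    (if i == j then
        match PySem.List.pyGetD d0 i none, PySem.List.pyGetD d1 j none with
        | some a, some b => if a + b == k then ans + 1 else ans
        | _, _ => ans
      else
        match PySem.List.pyGetD d0 i none, PySem.List.pyGetD d1 j none with
        | some a, some b => if a + b + 1 == k then ans + 1 else ans
        | _, _ => ans) = ans + cC d0 d1 k i j := by
  by_cases hij : i = j
  · subst hij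
    simp only [BEq.rfl, if_true, cC, dgC]
    cases PySem.List.pyGetD d0 i none <;> cases PySem.List.pyGetD d1 i none <;>
      simp <;> split <;> simp_all
  · simp only [beq_iff_eq, if_neg hij, cC, offC]
    cases PySem.List.pyGetD d0 i none <;> cases PySem.List.pyGetD d1 j none <;>
      simp <;> split <;> simp_all

lemma countA_eq_sum (d0 d1 : List (Option Int)) (n k : Int) :
    countA d0 d1 n k =
      ((PySem.List.pyRange 0 n 1).map
        (fun i => ((PySem.List.pyRange i n 1).map (cC d0 d1 k i)).sum)).sum := by
  unfold countA
  have h := foldl_add_of (PySem.List.pyRange 0 n 1) _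
    (fun i => ((PySem.List.pyRange i n 1).map (cC d0 d1 k i)).sum)
    (fun ans i => foldl_add_of (PySem.List.pyRange i n 1) _ (cC d0 d1 k i)
      (fun ans j => stepA_eq d0 d1 k i ans j) ans) 0
  rw [h, zero_add]

-- proof-only copy of countB's folding step
def stepB (d0 d1 : List (Option Int)) (k : Int) (s : Int × PySem.Dict Int Int) (j : Int) :
    Int × PySem.Dict Int Int :=
  let a := PySem.List.pyGetD d0 j none
  let b := PySem.List.pyGetD d1 j none
  let ans :=
    match a, b with
    | some av, some bv => if av + bv == k then s.1 + 1 else s.1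
    | _, _ => s.1
  let ans :=
    match b with
    | some bv => ans + s.2.getD (k - 1 - bv) 0
    | none => ans
  let cnt :=
    match a with
    | some av => s.2.insert av (s.2.getD av 0 + 1)
    | none => s.2
  (ans, cnt)

lemma countB_eq_foldl (d0 d1 : List (Option Int)) (n k : Int) :
    countB d0 d1 n k =
      ((PySem.List.pyRange 0 n 1).foldl (stepB d0 d1 k) ((0 : Int), PySem.Dict.empty)).1 := rfl

-- indicator sum for the frequency dict
def hitSum (d0 : List (Option Int)) (m : Int) (v : Int) : Int :=
  ((PySem.List.pyRange 0 m 1).map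
    (fun i => if PySem.List.pyGetD d0 i none = some v then (1 : Int) else 0)).sum

lemma offC_eq_indicator (d0 d1 : List (Option Int)) (k i j bv : Int)
    (h1 : PySem.List.pyGetD d1 j none = some bv) :
    offC d0 d1 k i j =
      if PySem.List.pyGetD d0 i none = some (k - 1 - bv) then (1 : Int) else 0 := by
  simp only [offC, h1]
  cases PySem.List.pyGetD d0 i none with
  | none => simp
  | some a =>
    simp only [Option.some.injEq]
    exact if_congr (by omega) rfl rfl

lemma offC_of_none (d0 d1 : List (Option Int)) (k i j : Int)
    (h1 : PySem.List.pyGetD d1 j none = none) : offC d0 d1 k i j = 0 := by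
  simp only [offC, h1]
  cases PySem.List.pyGetD d0 i none <;> rfl

lemma countB_inv (d0 d1 : List (Option Int)) (k : Int) : ∀ N : ℕ,
    (((PySem.List.pyRange 0 (N : Int) 1).foldl (stepB d0 d1 k) ((0 : Int), PySem.Dict.empty)).1 =
      ((PySem.List.pyRange 0 (N : Int) 1).map
        (fun j => dgC d0 d1 k j +
          ((PySem.List.pyRange 0 j 1).map (fun i => offC d0 d1 k i j)).sum)).sum) ∧
    (∀ v : Int,
      (((PySem.List.pyRange 0 (N : Int) 1).foldl (stepB d0 d1 k)
          ((0 : Int), PySem.Dict.empty)).2).getD v 0 = hitSum d0 (N : Int) v) := by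
  intro N
  induction N with
  | zero =>
    constructor
    · simp [PySem.List.pyRange_one_eq_nil]
    · intro v
      simp [PySem.List.pyRange_one_eq_nil, hitSum, PySem.Dict.getD_empty]
  | succ N ih =>
    have hcast : ((N + 1 : ℕ) : Int) = (N : Int) + 1 := by push_cast; ring
    have hsplit : PySem.List.pyRange 0 ((N + 1 : ℕ) : Int) 1 =
        PySem.List.pyRange 0 (N : Int) 1 ++ [(N : Int)] := by
      rw [hcast, PySem.List.pyRange_one_succ_right (by positivity)]
    obtain ⟨ih1, ih2⟩ := ih
    set S := (PySem.List.pyRange 0 (N : Int) 1).foldl (stepB d0 d1 k)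
      ((0 : Int), PySem.Dict.empty) with hS
    constructor
    · rw [hsplit, List.foldl_append, List.map_append, List.sum_append]
      simp only [List.foldl_cons, List.foldl_nil, List.map_cons, List.map_nil, List.sum_cons,
        List.sum_nil, add_zero, ← hS, ← ih1]
      show (stepB d0 d1 k S (N : Int)).1 = S.1 + _
      unfold stepB
      simp only []
      cases h0 : PySem.List.pyGetD d0 (N : Int) none <;>
        cases h1 : PySem.List.pyGetD d1 (N : Int) none
      · simp only [dgC, h0, h1]
        rw [List.map_congr_left (fun i _ => offC_of_none d0 d1 k i _ h1)]
        simp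
      · rename_i bv
        simp only [dgC, h0, h1]
        rw [List.map_congr_left (fun i _ => offC_eq_indicator d0 d1 k i _ bv h1), ih2]
        simp [hitSum]
      · simp only [dgC, h0, h1]
        rw [List.map_congr_left (fun i _ => offC_of_none d0 d1 k i _ h1)]
        simp
      · rename_i av bv
        simp only [dgC, h0, h1]
        rw [List.map_congr_left (fun i _ => offC_eq_indicator d0 d1 k i _ bv h1), ih2]
        simp only [hitSum, beq_iff_eq]
        split <;> ring
    · intro v
      rw [hsplit, List.foldl_append]
      simp only [List.foldl_cons, List.foldl_nil, ← hS]
      have hhit : hitSum d0 ((N + 1 : ℕ) : Int) v =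
          hitSum d0 (N : Int) v +
            (if PySem.List.pyGetD d0 (N : Int) none = some v then (1 : Int) else 0) := by
        simp only [hitSum, hsplit, List.map_append, List.sum_append, List.map_cons,
          List.map_nil, List.sum_cons, List.sum_nil, add_zero]
      rw [hhit, ← ih2 v]
      show ((stepB d0 d1 k S (N : Int)).2).getD v 0 = _
      unfold stepB
      simp only []
      cases h0 : PySem.List.pyGetD d0 (N : Int) none
      · simp
      · rename_i av
        simp only [PySem.Dict.getD_insert]
        by_cases hv : v = av
        · subst hv; simp
        · simp [hv, Ne.symm hv]

lemma countB_eq_sum (d0 d1 : List (Option Int)) (n k : Int) :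
    countB d0 d1 n k =
      ((PySem.List.pyRange 0 n 1).map
        (fun j => dgC d0 d1 k j +
          ((PySem.List.pyRange 0 j 1).map (fun i => offC d0 d1 k i j)).sum)).sum := by
  rw [countB_eq_foldl]
  by_cases hn : n ≤ 0
  · simp [PySem.List.pyRange_one_eq_nil hn]
  · have hn' : n = ((n.toNat : ℕ) : Int) := (Int.toNat_of_nonneg (by omega)).symm
    rw [hn']
    exact (countB_inv d0 d1 k n.toNat).1

lemma triangle_sum_nat (c : Int → Int → Int) : ∀ N : ℕ,
    ((PySem.List.pyRange 0 (N : Int) 1).map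
      (fun i => ((PySem.List.pyRange i (N : Int) 1).map (c i)).sum)).sum =
    ((PySem.List.pyRange 0 (N : Int) 1).map
      (fun j => c j j + ((PySem.List.pyRange 0 j 1).map (fun i => c i j)).sum)).sum := by
  intro N
  induction N with
  | zero => simp [PySem.List.pyRange_one_eq_nil]
  | succ N ih =>
    have hcast : ((N + 1 : ℕ) : Int) = (N : Int) + 1 := by push_cast; ring
    rw [hcast, PySem.List.pyRange_one_succ_right (by positivity)]
    rw [List.map_append, List.sum_append, List.map_append, List.sum_append]
    have h2 : (PySem.List.pyRange 0 (N : Int) 1).map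
          (fun i => ((PySem.List.pyRange i ((N : Int) + 1) 1).map (c i)).sum) =
        (PySem.List.pyRange 0 (N : Int) 1).map
          (fun i => ((PySem.List.pyRange i (N : Int) 1).map (c i)).sum + c i (N : Int)) := by
      refine List.map_congr_left ?_
      intro i hi
      have hi' := PySem.List.mem_pyRange_one.mp hi
      rw [PySem.List.pyRange_one_succ_right (by omega)]
      simp
    rw [h2, sum_map_add, ih]
    simp only [PySem.List.pyRange_one_singleton, List.map_cons, List.map_nil, List.sum_cons,
      List.sum_nil, add_zero]
    ring

lemma triangle_sum (c : Int → Int → Int) (n : Int) :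
    ((PySem.List.pyRange 0 n 1).map
      (fun i => ((PySem.List.pyRange i n 1).map (c i)).sum)).sum =
    ((PySem.List.pyRange 0 n 1).map
      (fun j => c j j + ((PySem.List.pyRange 0 j 1).map (fun i => c i j)).sum)).sum := by
  by_cases hn : n ≤ 0
  · simp [PySem.List.pyRange_one_eq_nil hn]
  · have hn' : n = ((n.toNat : ℕ) : Int) := (Int.toNat_of_nonneg (by omega)).symm
    rw [hn']
    exact triangle_sum_nat c n.toNat

lemma count_eq (d0 d1 : List (Option Int)) (n k : Int) :
    countA d0 d1 n k = countB d0 d1 n k := by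
  rw [countA_eq_sum, countB_eq_sum, triangle_sum (cC d0 d1 k) n]
  refine congrArg List.sum (List.map_congr_left ?_)
  intro j hj
  have hj' := (PySem.List.mem_pyRange_one.mp hj).1
  have : cC d0 d1 k j j = dgC d0 d1 k j := by simp [cC]
  rw [this]
  refine congrArg (dgC d0 d1 k j + ·) (congrArg List.sum (List.map_congr_left ?_))
  intro i hi
  have hij := (PySem.List.mem_pyRange_one.mp hi).2
  simp only [cC, if_neg (show ¬ i = j by omega)]

-- ===== VERDICT (by name: the statement is the Claim_ definition above) =====
theorem func_spec : Claim_equal_func := by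
  intro edge n k _hd _hp
  unfold Spec_func func func_alt
  simp only [dijk_eq', count_eq]
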